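-- pv_equiv track=rewrite | github.com/changshoumeng/PyxxnetFramework | pyxxnet_lib/pyxxnet3/core_utils.py | calculate_size
-- ===== SOURCE A (Python) =====
-- def calculate_size(s=""):
--     type_dic = {
--         "c": 1,
--         "b": 1,
--         "B": 1,
--         "h": 2,
--         "H": 2,
--         "i": 4,
--         "I": 4,
--         "Q": 8,
--     }
--     a = 0
--     for ch in s:
--         if ch not in type_dic:
--             print ("cannot find type:{0}".format( ch)    )
--             return
--         a += type_dic[ch]
--     return a
-- ===== SOURCE B (Python) =====
-- def calculate_size(s=""):
--     type_dic = {
--         "c": 1,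
--         "b": 1,
--         "B": 1,
--         "h": 2,
--         "H": 2,
--         "i": 4,
--         "I": 4,
--         "Q": 8,
--     }
--     first_bad = next((ch for ch in s if ch not in type_dic), None)
--     if first_bad is not None:
--         print("cannot find type:{0}".format(first_bad))
--         return
--     return sum(type_dic[ch] for ch in s)
-- ===== Notes on version B (the rewrite author's own statement) =====
-- stated objective: simpler
-- what changed: Replaced A's single accumulate-and-check loop with a validate-then-total decomposition: find the first unknown type char (next on a generator), then sum the sizes with sum() only when all chars are known.
import Mathlib
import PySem

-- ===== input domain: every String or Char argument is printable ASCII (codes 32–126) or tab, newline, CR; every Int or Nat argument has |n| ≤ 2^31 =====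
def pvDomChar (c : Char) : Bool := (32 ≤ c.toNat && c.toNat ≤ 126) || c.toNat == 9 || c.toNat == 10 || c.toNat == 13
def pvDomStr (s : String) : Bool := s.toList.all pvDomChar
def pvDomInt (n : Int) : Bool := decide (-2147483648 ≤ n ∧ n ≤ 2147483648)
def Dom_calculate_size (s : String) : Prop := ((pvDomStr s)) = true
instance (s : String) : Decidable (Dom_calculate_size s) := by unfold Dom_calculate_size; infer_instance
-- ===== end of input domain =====

-- B: validate-then-total decomposition (find first unknown char, else sum) instead of A's accumulate-and-check-in-one loop; same return values.
-- ===== PORT A =====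
def pvTypeDic : PySem.Dict Char Int :=
  PySem.Dict.ofList [('c',1),('b',1),('B',1),('h',2),('H',2),('i',4),('I',4),('Q',8)]

-- the for-loop of A: accumulator a, early return none on an unknown char
def calculateSizeLoop : List Char → Int → Option Int
  | [], a => some a
  | ch :: rest, a =>
    if (pvTypeDic.get? ch).isNone then
      none  -- print "cannot find type:…"; return  (print has no effect on the value)
    else
      calculateSizeLoop rest (a + (pvTypeDic.get? ch).getD 0)

def calculate_size (s : String) : Option Int :=
  calculateSizeLoop s.toList 0

-- ===== PORT B =====
-- first_bad = next((ch for ch in s if ch not in type_dic), None)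
def calculate_size_alt (s : String) : Option Int :=
  match s.toList.find? (fun ch => (pvTypeDic.get? ch).isNone) with
  | some _ => none  -- print, return None
  | none => some ((s.toList.map (fun ch => (pvTypeDic.get? ch).getD 0)).sum)

-- ===== PRECONDITION & SPEC =====
def Spec_calculate_size (s : String) (out : Option Int) : Prop := out = calculate_size_alt s
instance (s : String) (out : Option Int) : Decidable (Spec_calculate_size s out) := by unfold Spec_calculate_size; infer_instance

-- ===== CLAIM (what is proved, stated in full; the proofs are below) =====
def Claim_equal_calculate_size : Prop := ∀ (s : String), Dom_calculate_size s → Spec_calculate_size s (calculate_size s)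

-- ===== LEMMAS AND PROOFS =====

-- ===== VERDICT (by name: the statement is the Claim_ definition above) =====
theorem calculate_size_loop_eq (cs : List Char) (a : Int) :
    calculateSizeLoop cs a =
      match cs.find? (fun ch => (pvTypeDic.get? ch).isNone) with
      | some _ => none
      | none => some (a + (cs.map (fun ch => (pvTypeDic.get? ch).getD 0)).sum) := by
  induction cs generalizing a with
  | nil => simp [calculateSizeLoop]
  | cons ch rest ih =>
    simp only [calculateSizeLoop, List.find?_cons, List.map_cons, List.sum_cons]
    cases h : (pvTypeDic.get? ch).isNone with
    | true => simp
    | false =>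
      simp only [Bool.false_eq_true, if_false]
      -- h : lookup succeeds on ch
      rw [ih]
      cases rest.find? (fun ch => (pvTypeDic.get? ch).isNone) with
      | some _ => rfl
      | none => simp; ring

theorem calculate_size_spec : Claim_equal_calculate_size := by
  intro s _
  unfold Spec_calculate_size calculate_size calculate_size_alt
  rw [calculate_size_loop_eq]
  cases s.toList.find? (fun ch => (pvTypeDic.get? ch).isNone) with
  | some _ => rfl
  | none => simp
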